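-- pv_equiv track=rewrite | github.com/PhoneticsBug/Code-Workouts | workouts/Algorithm/10. October/week2/15989. 1, 2, 3 더하기 4/15989.py | solution
-- ===== SOURCE A (Python) =====
-- def solution(number):
--     dp = [[0]*4 for _ in range(number+1)]
--     dp[0][1] = 1
--     for i in range(1, number+1):
--         # 직전의 경우의 수를 하나씩 더함
--         dp[i][1] = dp[i-1][1]
--         if i >= 2:
--             dp[i][2] = dp[i-2][1] + dp[i-2][2]
--         if i >= 3:
--             dp[i][3] = dp[i-3][1] + dp[i-3][2] + dp[i-3][3]
--     result = sum(dp[number])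
--     return result
-- ===== SOURCE B (Python) =====
-- def solution(number):
--     # closed form: the count of partitions of number into parts 1, 2, 3 is round((number+3)^2/12)
--     return ((number + 3) ** 2 + 6) // 12
-- ===== Notes on version B (the rewrite author's own statement) =====
-- stated objective: faster
-- what changed: Replaced the O(n) DP table over rows [*,1,2,3] by the closed form ((n+3)^2+6)//12 for the number of partitions of n into parts 1,2,3.
import Mathlib
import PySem

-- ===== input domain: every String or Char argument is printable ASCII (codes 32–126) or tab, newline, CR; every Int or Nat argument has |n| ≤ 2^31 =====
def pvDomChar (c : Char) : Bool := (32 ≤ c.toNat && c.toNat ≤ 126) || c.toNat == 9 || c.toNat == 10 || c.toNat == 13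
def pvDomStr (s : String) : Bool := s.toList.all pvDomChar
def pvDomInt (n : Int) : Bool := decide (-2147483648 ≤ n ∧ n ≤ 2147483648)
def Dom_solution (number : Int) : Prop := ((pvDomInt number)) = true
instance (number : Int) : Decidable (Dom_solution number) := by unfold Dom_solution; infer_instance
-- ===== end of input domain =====

-- B replaces A's O(n) DP table by the closed form ((n+3)^2+6)//12 (objective: faster, asymptotic).

-- ===== PORT A =====
-- Python lists are ported as Arrays (O(1) indexing, as in Python); reads default to 0 / writes
-- are in-bounds no-ops out of range, but every index is in range on Pre_ (0 ≤ number).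
def pvGet2 (dp : Array (Array Int)) (i j : Nat) : Int := (dp.getD i #[]).getD j 0
def pvSet2 (dp : Array (Array Int)) (i j : Nat) (v : Int) : Array (Array Int) :=
  dp.modify i (fun row => row.set! j v)

-- the three statements of A's loop body (dp[i][1] = …; if i >= 2: …; if i >= 3: …)
def pvStepA (dp : Array (Array Int)) (i : Int) : Array (Array Int) :=
  let v := pvGet2 dp (i.toNat - 1) 1
  pvSet2 dp i.toNat 1 v
def pvStepB (dp : Array (Array Int)) (i : Int) : Array (Array Int) :=
  if 2 ≤ i then
    let v := pvGet2 dp (i.toNat - 2) 1 + pvGet2 dp (i.toNat - 2) 2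
    pvSet2 dp i.toNat 2 v
  else dp
def pvStepC (dp : Array (Array Int)) (i : Int) : Array (Array Int) :=
  if 3 ≤ i then
    let v := pvGet2 dp (i.toNat - 3) 1 + pvGet2 dp (i.toNat - 3) 2 + pvGet2 dp (i.toNat - 3) 3
    pvSet2 dp i.toNat 3 v
  else dp
-- the body of A's `for i in range(1, number+1)` loop
def pvStep (dp : Array (Array Int)) (i : Int) : Array (Array Int) :=
  pvStepC (pvStepB (pvStepA dp i) i) i

def solution (number : Int) : Int :=
  (((PySem.List.pyRange 1 (number + 1) 1).foldl pvStep
      (pvSet2 (Array.replicate (number + 1).toNat (Array.replicate 4 0)) 0 1 1)).getD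
    number.toNat #[]).foldl (· + ·) 0

-- ===== PORT B =====
def solution_alt (number : Int) : Int := PySem.Int.floordiv ((number + 3) ^ 2 + 6) 12

-- ===== PRECONDITION & SPEC =====
-- A raises IndexError (dp[0][1] on an empty dp) for number < 0; excluded.
def Pre_solution (number : Int) : Prop := 0 ≤ number
instance (number : Int) : Decidable (Pre_solution number) := by unfold Pre_solution; infer_instance
def pvWitness_solution : Int := 5

def Spec_solution (number : Int) (out : Int) : Prop := out = solution_alt number
instance (number : Int) (out : Int) : Decidable (Spec_solution number out) := by unfold Spec_solution; infer_instance

-- ===== CLAIM (what is proved, stated in full; the proofs are below) =====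
def Claim_equal_solution : Prop := ∀ (number : Int), Dom_solution number → Pre_solution number → Spec_solution number (solution number)

-- ===== LEMMAS AND PROOFS =====

-- List model of the Array dp table (proof side only)
def pvGet2L (dp : List (List Int)) (i j : Nat) : Int := (dp.getD i []).getD j 0
def pvSet2L (dp : List (List Int)) (i j : Nat) (v : Int) : List (List Int) :=
  dp.set i ((dp.getD i []).set j v)
def pvStepAL (dp : List (List Int)) (i : Int) : List (List Int) :=
  pvSet2L dp i.toNat 1 (pvGet2L dp (i.toNat - 1) 1)
def pvStepBL (dp : List (List Int)) (i : Int) : List (List Int) :=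
  if 2 ≤ i then pvSet2L dp i.toNat 2 (pvGet2L dp (i.toNat - 2) 1 + pvGet2L dp (i.toNat - 2) 2) else dp
def pvStepCL (dp : List (List Int)) (i : Int) : List (List Int) :=
  if 3 ≤ i then
    pvSet2L dp i.toNat 3 (pvGet2L dp (i.toNat - 3) 1 + pvGet2L dp (i.toNat - 3) 2 + pvGet2L dp (i.toNat - 3) 3)
  else dp
def pvStepL (dp : List (List Int)) (i : Int) : List (List Int) :=
  pvStepCL (pvStepBL (pvStepAL dp i) i) i

-- the List model seen as the Array table
def pvConv (l : List (List Int)) : Array (Array Int) := (l.map List.toArray).toArray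

theorem rowSet_conv (lr : List Int) (j : Nat) (v : Int) :
    lr.toArray.set! j v = (lr.set j v).toArray := by
  rw [← Array.toList_inj]; simp [Array.set!]

theorem conv_getD (l : List (List Int)) (i : Nat) :
    (pvConv l).getD i #[] = (l.getD i []).toArray := by
  unfold pvConv
  by_cases h : i < l.length
  · simp [Array.getD, h, List.getD_eq_getElem?_getD]
  · simp [Array.getD, h, List.getD_eq_getElem?_getD]

theorem conv_get (l : List (List Int)) (i j : Nat) : pvGet2 (pvConv l) i j = pvGet2L l i j := by
  unfold pvGet2 pvGet2L
  rw [conv_getD]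
  generalize l.getD i [] = lr
  by_cases h : j < lr.length
  · simp [Array.getD, h, List.getD_eq_getElem?_getD]
  · simp [Array.getD, h, List.getD_eq_getElem?_getD]

theorem conv_set (l : List (List Int)) (i j : Nat) (v : Int) :
    pvSet2 (pvConv l) i j v = pvConv (pvSet2L l i j v) := by
  unfold pvSet2 pvSet2L pvConv
  rw [← Array.toList_inj]
  rw [Array.toList_modify]
  apply List.ext_getElem
  · simp [List.length_modify]
  · intro x h1 h2
    rw [List.getElem_modify]
    simp only [List.getElem_map, List.getElem_set]
    rcases eq_or_ne i x with h | h
    · subst h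
      have hi : i < l.length := by simpa [List.length_modify] using h1
      rw [if_pos rfl, if_pos rfl, rowSet_conv]
      congr 2
      rw [List.getD_eq_getElem?_getD, List.getElem?_eq_getElem hi]
      rfl
    · rw [if_neg h, if_neg h]

theorem conv_stepA (l : List (List Int)) (i : Int) :
    pvStepA (pvConv l) i = pvConv (pvStepAL l i) := by
  unfold pvStepA pvStepAL
  rw [conv_get, conv_set]

theorem conv_stepB (l : List (List Int)) (i : Int) :
    pvStepB (pvConv l) i = pvConv (pvStepBL l i) := by
  unfold pvStepB pvStepBL
  split_ifs
  · rw [conv_get, conv_get, conv_set]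
  · rfl

theorem conv_stepC (l : List (List Int)) (i : Int) :
    pvStepC (pvConv l) i = pvConv (pvStepCL l i) := by
  unfold pvStepC pvStepCL
  split_ifs
  · rw [conv_get, conv_get, conv_get, conv_set]
  · rfl

theorem conv_step (l : List (List Int)) (i : Int) :
    pvStep (pvConv l) i = pvConv (pvStepL l i) := by
  unfold pvStep pvStepL
  rw [conv_stepA, conv_stepB, conv_stepC]

theorem conv_foldl (xs : List Int) (l : List (List Int)) :
    xs.foldl pvStep (pvConv l) = pvConv (xs.foldl pvStepL l) := by
  induction xs generalizing l with
  | nil => rfl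
  | cons x xs ih => simp only [List.foldl_cons, conv_step, ih]

-- intended contents of dp[i][2] and dp[i][3] after the loop has passed i
def rowB : Nat → Int
  | 0 => 0
  | 1 => 0
  | n + 2 => rowB n + 1

def rowC : Nat → Int
  | 0 => 0
  | 1 => 0
  | 2 => 0
  | n + 3 => 1 + rowB n + rowC n

-- the dp row i after iterations 1..k have run
def pvRow (k i : Nat) : List Int := if i ≤ k then [0, 1, rowB i, rowC i] else [0, 0, 0, 0]

-- the whole dp table (size N+1) after iterations 1..k have run
def pvDP (N k : Nat) : List (List Int) := (List.range (N + 1)).map (pvRow k)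

theorem set_map_range {α : Type} (m i : Nat) (f : Nat → α) (y : α) :
    ((List.range m).map f).set i y = (List.range m).map (fun x => if x = i then y else f x) := by
  apply List.ext_getElem
  · simp
  · intro j h1 h2
    simp only [List.getElem_set, List.getElem_map, List.getElem_range]
    rcases eq_or_ne i j with h | h
    · subst h; simp
    · rw [if_neg h, if_neg (Ne.symm h)]

theorem getD_map_range' {α : Type} (m i : Nat) (f : Nat → α) (d : α) (hi : i < m) :
    ((List.range m).map f).getD i d = f i := by
  rw [List.getD_eq_getElem?_getD]
  simp [hi]

theorem pvSet2L_map_range (m i j : Nat) (f : Nat → List Int) (v : Int) (hi : i < m) :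
    pvSet2L ((List.range m).map f) i j v
      = (List.range m).map (fun x => if x = i then (f i).set j v else f x) := by
  unfold pvSet2L
  rw [getD_map_range' m i f [] hi, set_map_range m i f _]

theorem pvGet2L_map_range (m i j : Nat) (f : Nat → List Int) (hi : i < m) :
    pvGet2L ((List.range m).map f) i j = (f i).getD j 0 := by
  unfold pvGet2L
  rw [getD_map_range' m i f [] hi]

theorem pvDP_init (N : Nat) :
    pvSet2L (List.replicate (N + 1) ([0, 0, 0, 0] : List Int)) 0 1 1 = pvDP N 0 := by
  unfold pvSet2L pvDP
  apply List.ext_getElem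
  · simp
  · intro j h1 h2
    simp only [List.getElem_set, List.getElem_map, List.getElem_range, List.getD,
      List.getElem_replicate]
    rcases j with _ | j <;> simp [pvRow, rowB, rowC]

-- dp rows after each of the three statements of iteration i = k+1
def pvRowA (k x : Nat) : List Int := if x = k + 1 then [0, 1, 0, 0] else pvRow k x
def pvRowB (k x : Nat) : List Int := if x = k + 1 then [0, 1, rowB (k + 1), 0] else pvRow k x

theorem stageA (N k : Nat) (hk : k < N) :
    pvStepAL ((List.range (N + 1)).map (pvRow k)) ((k : Int) + 1)
      = (List.range (N + 1)).map (pvRowA k) := by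
  unfold pvStepAL
  have hn : ((k : Int) + 1).toNat = k + 1 := by omega
  rw [hn]
  simp only [show k + 1 - 1 = k from rfl]
  rw [pvGet2L_map_range (N + 1) k 1 (pvRow k) (by omega),
    pvSet2L_map_range (N + 1) (k + 1) 1 (pvRow k) _ (by omega)]
  apply List.map_congr_left
  intro x _
  unfold pvRowA pvRow
  rcases eq_or_ne x (k + 1) with h | h
  · simp [h]
  · simp [h]

theorem stageB (N k : Nat) (hk : k < N) :
    pvStepBL ((List.range (N + 1)).map (pvRowA k)) ((k : Int) + 1)
      = (List.range (N + 1)).map (pvRowB k) := by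
  unfold pvStepBL
  have hn : ((k : Int) + 1).toNat = k + 1 := by omega
  rw [hn]
  simp only [show k + 1 - 2 = k - 1 from rfl]
  rcases k with _ | k'
  · rw [if_neg (by norm_num)]
    apply List.map_congr_left
    intro x _
    unfold pvRowA pvRowB
    rcases eq_or_ne x 1 with h | h <;> simp [h, rowB]
  · rw [if_pos (by push_cast; omega)]
    rw [pvGet2L_map_range (N + 1) (k' + 1 - 1) 1 (pvRowA (k' + 1)) (by omega),
      pvGet2L_map_range (N + 1) (k' + 1 - 1) 2 (pvRowA (k' + 1)) (by omega),
      pvSet2L_map_range (N + 1) (k' + 1 + 1) 2 (pvRowA (k' + 1)) _ (by omega)]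
    apply List.map_congr_left
    intro x _
    simp only [show k' + 1 - 1 = k' from rfl]
    unfold pvRowA pvRowB pvRow
    rcases eq_or_ne x (k' + 1 + 1) with h | h
    · have h1 : ¬ (k' = k' + 1 + 1) := by omega
      have h2 : k' ≤ k' + 1 := by omega
      simp [h, h1, h2]
      rw [show k' + 1 + 1 = k' + 2 from rfl, rowB]
      ring
    · simp [h]

theorem stageC (N k : Nat) (hk : k < N) :
    pvStepCL ((List.range (N + 1)).map (pvRowB k)) ((k : Int) + 1)
      = (List.range (N + 1)).map (pvRow (k + 1)) := by
  unfold pvStepCL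
  have hn : ((k : Int) + 1).toNat = k + 1 := by omega
  rw [hn]
  simp only [show k + 1 - 3 = k - 2 from rfl]
  rcases k with _ | _ | k'
  · rw [if_neg (by norm_num)]
    apply List.map_congr_left
    intro x _
    unfold pvRowB pvRow
    rcases eq_or_ne x 1 with h | h
    · simp [h, rowC]
    · simp [h]
      split_ifs with h1 h2 h2 <;> first | rfl | omega
  · rw [if_neg (by norm_num)]
    apply List.map_congr_left
    intro x _
    unfold pvRowB pvRow
    rcases eq_or_ne x 2 with h | h
    · simp [h, rowC]
    · simp [h]
      split_ifs with h1 h2 h2 <;> first | rfl | omega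
  · rw [if_pos (by push_cast; omega)]
    rw [pvGet2L_map_range (N + 1) (k' + 2 - 2) 1 (pvRowB (k' + 2)) (by omega),
      pvGet2L_map_range (N + 1) (k' + 2 - 2) 2 (pvRowB (k' + 2)) (by omega),
      pvGet2L_map_range (N + 1) (k' + 2 - 2) 3 (pvRowB (k' + 2)) (by omega),
      pvSet2L_map_range (N + 1) (k' + 2 + 1) 3 (pvRowB (k' + 2)) _ (by omega)]
    apply List.map_congr_left
    intro x _
    simp only [show k' + 2 - 2 = k' from rfl]
    unfold pvRowB pvRow
    rcases eq_or_ne x (k' + 2 + 1) with h | h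
    · have h1 : ¬ (k' = k' + 2 + 1) := by omega
      have h2 : k' ≤ k' + 2 := by omega
      simp [h, h1, h2]
      rw [show k' + 2 + 1 = k' + 3 from rfl, rowC]
    · simp [h]
      split_ifs with h1 h2 h2 <;> first | rfl | omega

theorem pvStepL_dp (N k : Nat) (hk : k < N) :
    pvStepL (pvDP N k) ((k : Int) + 1) = pvDP N (k + 1) := by
  unfold pvStepL pvDP
  rw [stageA N k hk, stageB N k hk, stageC N k hk]

theorem pvFold_dp (N k : Nat) (hk : k ≤ N) :
    (PySem.List.pyRange 1 ((k : Int) + 1) 1).foldl pvStepL (pvDP N 0) = pvDP N k := by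
  induction k with
  | zero => rw [PySem.List.pyRange_one_eq_nil (by norm_num)]; rfl
  | succ k ih =>
    have h1 : ((k : Int) + 1 + 1) = (((k + 1 : Nat) : Int) + 1) := by push_cast; ring
    have := PySem.List.pyRange_one_succ_right (a := 1) (b := (k : Int) + 1) (by omega)
    rw [← h1, this, List.foldl_append, ih (by omega)]
    simpa using pvStepL_dp N k hk

theorem rowB_eq (n : Nat) : rowB n = ((n / 2 : Nat) : Int) := by
  induction n using Nat.strong_induction_on with
  | _ n ih =>
    match n with
    | 0 => rfl
    | 1 => rfl
    | n + 2 =>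
      rw [rowB, ih n (by omega)]
      have : (n + 2) / 2 = n / 2 + 1 := by omega
      rw [this]; push_cast; ring

theorem key_m (m : Nat) : ((m + 3) ^ 2 + 6) / 12 = 1 + m / 2 + (m ^ 2 + 6) / 12 := by
  obtain ⟨q, s, hs, rfl⟩ : ∃ q s, s < 6 ∧ m = 6 * q + s := ⟨m / 6, m % 6, by omega, by omega⟩
  have h1 : (6 * q + s + 3) ^ 2 = 36 * (q * q) + 12 * (q * s) + 36 * q + (s * s + 6 * s + 9) := by ring
  have h2 : (6 * q + s) ^ 2 = 36 * (q * q) + 12 * (q * s) + s * s := by ring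
  rw [h1, h2]
  generalize q * q = A at *
  generalize q * s = P at *
  interval_cases s <;> omega

theorem total_eq (n : Nat) : 1 + rowB n + rowC n = ((((n + 3) ^ 2 + 6) / 12 : Nat) : Int) := by
  induction n using Nat.strong_induction_on with
  | _ n ih =>
    match n with
    | 0 => rfl
    | 1 => rfl
    | 2 => rfl
    | n + 3 =>
      have ihn := ih n (by omega)
      rw [rowC, rowB_eq (n + 3)]
      have hk := key_m (n + 3)
      have e : n + 3 + 3 = n + 6 := by omega
      rw [e, hk]
      push_cast
      push_cast at ihn
      linarith

theorem solution_closed (n : Nat) : solution (n : Int) = 1 + rowB n + rowC n := by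
  unfold solution
  have h0 : ((n : Int) + 1).toNat = n + 1 := by omega
  have hrep : Array.replicate (n + 1) (Array.replicate 4 (0 : Int))
      = pvConv (List.replicate (n + 1) [0, 0, 0, 0]) := by
    unfold pvConv
    rw [← List.toArray_replicate, ← List.toArray_replicate]
    congr 1
    simp
  rw [h0, hrep, conv_set, pvDP_init n, conv_foldl, pvFold_dp n n (le_refl n)]
  have hn : (n : Int).toNat = n := by omega
  rw [hn]
  unfold pvDP
  rw [conv_getD, getD_map_range' (n + 1) n (pvRow n) [] (by omega)]
  rw [List.foldl_toArray]
  simp [pvRow, List.foldl]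

-- ===== VERDICT (by name: the statement is the Claim_ definition above) =====
theorem solution_spec : Claim_equal_solution := by
  intro number _ hpre
  unfold Spec_solution solution_alt
  lift number to Nat using hpre with n
  rw [solution_closed n, total_eq n]
  have : ((n : Int) + 3) ^ 2 + 6 = (((n + 3) ^ 2 + 6 : Nat) : Int) := by push_cast; ring
  rw [this]
  exact_mod_cast (PySem.Int.floordiv_natCast ((n + 3) ^ 2 + 6) 12).symm
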